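-- pv_equiv track=rewrite | github.com/KelianB/tab-gen | backend/file_generator/chords.py | differents_max
-- ===== SOURCE A (Python) =====
-- def differents_max(c0, c1, c2, c3, c4, c5):
--
-- 	poss = [c0, c1, c2, c3, c4, c5]
-- 	poss = [x for x in poss if x != [0,0,0,0,0,0]]
-- 	indexes = [x.index(max(x)) for x in poss]
--
-- 	if len(indexes) > len(set(indexes)):
-- 		return False
-- 	else:
-- 		return True
-- ===== SOURCE B (Python) =====
-- # B: single-pass running-argmax per chord (instead of max() then .index()),
-- # and an early-exit pairwise scan (instead of set-cardinality comparison).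
-- ZERO = [0, 0, 0, 0, 0, 0]
--
-- def _argmax(x):
--     # first index of the maximum, one pass
--     bi = 0
--     for i in range(1, len(x)):
--         if x[i] > x[bi]:
--             bi = i
--     return bi
--
-- def differents_max(c0, c1, c2, c3, c4, c5):
--     chords = [x for x in (c0, c1, c2, c3, c4, c5) if x != ZERO]
--     while chords:
--         x = chords.pop(0)
--         for y in chords:
--             if _argmax(x) == _argmax(y):
--                 return False
--     return True
-- ===== Notes on version B (the rewrite author's own statement) =====
-- stated objective: alternative
-- what changed: B computes each chord's first-max index with a single running-argmax pass (A does max() then .index(), two passes) and decides distinctness by a pairwise comparison loop with early exit over the remaining chords (A compares the list length with the size of a set).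
import Mathlib
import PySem

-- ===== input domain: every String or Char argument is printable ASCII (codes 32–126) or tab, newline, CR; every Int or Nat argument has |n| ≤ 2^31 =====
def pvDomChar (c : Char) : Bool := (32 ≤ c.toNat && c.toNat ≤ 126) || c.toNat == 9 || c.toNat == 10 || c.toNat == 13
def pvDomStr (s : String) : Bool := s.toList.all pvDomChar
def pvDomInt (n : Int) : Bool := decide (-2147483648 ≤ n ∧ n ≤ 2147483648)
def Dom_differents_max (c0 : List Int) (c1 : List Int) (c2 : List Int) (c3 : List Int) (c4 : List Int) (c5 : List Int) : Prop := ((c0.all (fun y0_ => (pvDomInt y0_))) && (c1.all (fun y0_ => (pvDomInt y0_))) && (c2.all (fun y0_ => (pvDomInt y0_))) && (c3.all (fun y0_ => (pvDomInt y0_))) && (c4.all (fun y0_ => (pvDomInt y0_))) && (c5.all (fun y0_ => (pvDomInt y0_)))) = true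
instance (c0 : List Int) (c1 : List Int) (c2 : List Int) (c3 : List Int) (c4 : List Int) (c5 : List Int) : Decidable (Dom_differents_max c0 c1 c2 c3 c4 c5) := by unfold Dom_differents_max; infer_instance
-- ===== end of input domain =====

-- B computes each chord's first-max index by a single running-argmax pass (A: max() then
-- .index(), two passes) and tests distinctness by a pairwise early-exit scan (A: set size).

-- ===== PORT A =====
-- x.index(max(x)) as A computes it: max of the list, then first index of that value.
-- The 'none'/getD 0 arms are unreachable under Pre_ (max([]) raises ValueError in Python).
def pyIdxMax (x : List Int) : Int :=
  match PySem.List.max? x (fun y => y) with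
  | none => 0
  | some m => ((PySem.List.index? x m).getD 0 : Int)

def differents_max (c0 : List Int) (c1 : List Int) (c2 : List Int) (c3 : List Int) (c4 : List Int) (c5 : List Int) : Bool :=
  let poss := [c0, c1, c2, c3, c4, c5]
  let poss := poss.filter (fun x => x != [0, 0, 0, 0, 0, 0])
  let indexes := poss.map pyIdxMax
  if indexes.length > (PySem.Set.ofList indexes).length then false else true

-- ===== PORT B =====
-- _argmax: bi = 0; for i in range(1, len(x)): if x[i] > x[bi]: bi = i.  Indices produced by
-- range(1, len(x)) are in range, so pyGetD with default 0 is exact here.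
def argmaxB (x : List Int) : Int :=
  (PySem.List.pyRange 1 x.length).foldl
    (fun bi i => if PySem.List.pyGetD x i 0 > PySem.List.pyGetD x bi 0 then i else bi) 0

-- the while/pop loop: compare the front chord with each remaining one (early return False),
-- then continue on the rest.
def pairLoop : List (List Int) → Bool
  | [] => true
  | x :: rest => if rest.any (fun y => argmaxB x == argmaxB y) then false else pairLoop rest

def differents_max_alt (c0 : List Int) (c1 : List Int) (c2 : List Int) (c3 : List Int) (c4 : List Int) (c5 : List Int) : Bool :=
  let chords := [c0, c1, c2, c3, c4, c5].filter (fun x => x != [0, 0, 0, 0, 0, 0])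
  pairLoop chords

-- ===== PRECONDITION & SPEC =====
-- Pre_ excludes exactly the inputs where the Python A raises: an empty chord list reaches
-- max([]) (ValueError). Nothing else is excluded.
def Pre_differents_max (c0 : List Int) (c1 : List Int) (c2 : List Int) (c3 : List Int) (c4 : List Int) (c5 : List Int) : Prop :=
  c0 ≠ [] ∧ c1 ≠ [] ∧ c2 ≠ [] ∧ c3 ≠ [] ∧ c4 ≠ [] ∧ c5 ≠ []
instance (c0 : List Int) (c1 : List Int) (c2 : List Int) (c3 : List Int) (c4 : List Int) (c5 : List Int) : Decidable (Pre_differents_max c0 c1 c2 c3 c4 c5) := by unfold Pre_differents_max; infer_instance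

def pvWitness_differents_max : List Int × List Int × List Int × List Int × List Int × List Int :=
  ([3, 1], [1, 3], [0, 0, 0, 0, 0, 0], [2], [0, 2], [5, 4])

def Spec_differents_max (c0 : List Int) (c1 : List Int) (c2 : List Int) (c3 : List Int) (c4 : List Int) (c5 : List Int) (out : Bool) : Prop := out = differents_max_alt c0 c1 c2 c3 c4 c5
instance (c0 : List Int) (c1 : List Int) (c2 : List Int) (c3 : List Int) (c4 : List Int) (c5 : List Int) (out : Bool) : Decidable (Spec_differents_max c0 c1 c2 c3 c4 c5 out) := by unfold Spec_differents_max; infer_instance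

-- ===== CLAIM =====
def Claim_equal_differents_max : Prop := ∀ (c0 : List Int) (c1 : List Int) (c2 : List Int) (c3 : List Int) (c4 : List Int) (c5 : List Int), Dom_differents_max c0 c1 c2 c3 c4 c5 → Pre_differents_max c0 c1 c2 c3 c4 c5 → Spec_differents_max c0 c1 c2 c3 c4 c5 (differents_max c0 c1 c2 c3 c4 c5)

-- ===== LEMMAS AND PROOFS =====

-- A's set-size duplicate test = Nodup.
lemma set_len_test (l : List Int) :
    (if l.length > (PySem.Set.ofList l).length then false else true) = decide l.Nodup := by
  by_cases h : l.Nodup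
  · rw [PySem.Set.ofList_eq_self_of_nodup l h]
    simp [h]
  · have hle := PySem.Set.length_ofList_le l
    have hlt : (PySem.Set.ofList l).length < l.length := by
      rcases lt_or_eq_of_le hle with hlt | heq
      · exact hlt
      · exfalso
        apply h
        have h1 := PySem.Set.nodup_ofList l
        have h2 : PySem.Set.ofList l ⊆ l := fun x hx => by
          simpa [PySem.Set.mem_ofList] using hx
        have hsp := List.subperm_of_subset h1 h2
        have hp := hsp.perm_of_length_le (by omega)
        exact (hp.nodup_iff).mp h1
    simp [h, hlt]

-- B's pairwise early-exit scan = Nodup of the argmax images.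
lemma pairLoop_eq_nodup (l : List (List Int)) :
    pairLoop l = decide ((l.map argmaxB).Nodup) := by
  induction l with
  | nil => simp [pairLoop]
  | cons x rest ih =>
    by_cases h : argmaxB x ∈ rest.map argmaxB
    · have hany : rest.any (fun y => argmaxB x == argmaxB y) = true := by
        rcases List.mem_map.mp h with ⟨y, hy, he⟩
        exact List.any_eq_true.mpr ⟨y, hy, by simp [he.symm]⟩
      simp [pairLoop, hany, h]
    · have hany : rest.any (fun y => argmaxB x == argmaxB y) = false := by
        rw [List.any_eq_false]
        intro y hy
        simp only [beq_iff_eq]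
        exact fun he => h (List.mem_map.mpr ⟨y, hy, he.symm⟩)
      simp [pairLoop, hany, ih, h]

-- The running-argmax fold over range(1, k) yields the first-max index of the k-prefix.
lemma argmax_fold_inv (x : List Int) (k : ℕ) (h1 : 1 ≤ k) (hk : k ≤ x.length) :
    ∃ b : ℕ, (PySem.List.pyRange 1 (k : Int)).foldl
        (fun bi i => if PySem.List.pyGetD x i 0 > PySem.List.pyGetD x bi 0 then i else bi) 0
        = (b : Int) ∧ b < k ∧
      (∀ j, j < k → x.getD j 0 ≤ x.getD b 0) ∧ (∀ j, j < b → x.getD j 0 < x.getD b 0) := by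
  induction k with
  | zero => omega
  | succ k ih =>
    by_cases hk1 : k = 0
    · subst hk1
      refine ⟨0, ?_, by omega, ?_, by omega⟩
      · have : PySem.List.pyRange 1 (1 : Int) = [] := by decide
        simp [this]
      · intro j hj
        interval_cases j
        exact le_refl _
    · have hkk : 1 ≤ k := by omega
      obtain ⟨b, hfold, hb, hmax, hfirst⟩ := ih hkk (by omega)
      have hsplit : PySem.List.pyRange 1 ((k : Int) + 1)
          = PySem.List.pyRange 1 (k : Int) ++ [(k : Int)] :=
        PySem.List.pyRange_one_succ_right (by exact_mod_cast hkk)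
      have hcast : ((k + 1 : ℕ) : Int) = (k : Int) + 1 := by push_cast; ring
      rw [hcast, hsplit, List.foldl_append, hfold]
      have hgk : PySem.List.pyGetD x (k : Int) 0 = x.getD k 0 := by
        rw [PySem.List.pyGetD_of_nonneg x 0 (by positivity)]; simp
      have hgb : PySem.List.pyGetD x (b : Int) 0 = x.getD b 0 := by
        rw [PySem.List.pyGetD_of_nonneg x 0 (by positivity)]; simp
      simp only [List.foldl_cons, List.foldl_nil, hgk, hgb]
      by_cases hc : x.getD k 0 > x.getD b 0
      · refine ⟨k, by rw [if_pos hc], by omega, ?_, ?_⟩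
        · intro j hj
          rcases Nat.lt_succ_iff_lt_or_eq.mp hj with hj' | hj'
          · exact le_of_lt (lt_of_le_of_lt (hmax j hj') hc)
          · subst hj'; exact le_refl _
        · intro j hj
          exact lt_of_le_of_lt (hmax j hj) hc
      · refine ⟨b, by rw [if_neg hc], by omega, ?_, hfirst⟩
        intro j hj
        rcases Nat.lt_succ_iff_lt_or_eq.mp hj with hj' | hj'
        · exact hmax j hj'
        · subst hj'; omega

-- On a nonempty list the two first-max-index computations agree.
lemma argmax_eq (x : List Int) (hx : x ≠ []) : argmaxB x = pyIdxMax x := by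
  obtain ⟨a, t, rfl⟩ := List.exists_cons_of_ne_nil hx
  set x := a :: t with hxdef
  have hn : 1 ≤ x.length := by simp [hxdef]
  obtain ⟨b, hfold, hb, hmax, hfirst⟩ := argmax_fold_inv x x.length hn (le_refl _)
  -- the max value
  set m := t.foldl max a with hm
  have hmmax : PySem.List.max? x (fun y => y) = some m := PySem.List.max?_id_cons a t
  have hmem_le : ∀ y ∈ x, y ≤ m := by
    intro y hy
    rcases List.mem_cons.mp hy with h | h
    · subst h; exact (PySem.List.le_foldl_max t y).1
    · exact (PySem.List.le_foldl_max t a).2 y h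
  have hm_mem : m ∈ x := by
    rcases PySem.List.foldl_max_mem t a with h | h
    · rw [hm, h]; exact List.mem_cons_self
    · exact List.mem_cons_of_mem a h
  -- x[b] = m
  have hbm : x.getD b 0 = m := by
    obtain ⟨j, hj, hxj⟩ := List.mem_iff_getElem.mp hm_mem
    have hbmem : x.getD b 0 ∈ x := by
      rw [List.getD_eq_getElem x 0 hb]; exact List.getElem_mem hb
    have h1 : x.getD b 0 ≤ m := hmem_le _ hbmem
    have h2 : m ≤ x.getD b 0 := by
      have := hmax j hj
      rwa [List.getD_eq_getElem x 0 hj, hxj] at this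
    omega
  -- index? x m = some b
  have hidx : PySem.List.index? x m = some b := by
    rw [PySem.List.index?_eq_some_iff]
    refine ⟨x.take b, x.drop (b + 1), ?_, List.length_take_of_le (le_of_lt hb), ?_⟩
    · have hdrop : x.drop b = x[b] :: x.drop (b + 1) := List.drop_eq_getElem_cons hb
      have hbm' : x[b] = m := by rwa [List.getD_eq_getElem x 0 hb] at hbm
      rw [← hbm', ← hdrop, List.take_append_drop]
    · intro hmem
      obtain ⟨j, hj, hxj⟩ := List.mem_iff_getElem.mp hmem
      have hjb : j < b := by
        have := hj; rwa [List.length_take_of_le (le_of_lt hb)] at this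
      have hxj' : x.getD j 0 = m := by
        rw [List.getD_eq_getElem x 0 (lt_trans hjb hb), ← hxj,
          List.getElem_take]
      have := hfirst j hjb
      omega
  -- conclude
  unfold argmaxB pyIdxMax
  rw [hmmax]
  show List.foldl (fun bi i => if PySem.List.pyGetD x i 0 > PySem.List.pyGetD x bi 0 then i else bi) 0
      (PySem.List.pyRange 1 (x.length : Int)) = ((PySem.List.index? x m).getD 0 : Int)
  rw [hidx, hfold]
  simp

-- ===== VERDICT =====
theorem differents_max_spec : Claim_equal_differents_max := by
  intro c0 c1 c2 c3 c4 c5 _ hpre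
  obtain ⟨h0, h1, h2, h3, h4, h5⟩ := hpre
  unfold Spec_differents_max differents_max differents_max_alt
  rw [pairLoop_eq_nodup, set_len_test]
  have hmap : ([c0, c1, c2, c3, c4, c5].filter (fun x => x != [0, 0, 0, 0, 0, 0])).map pyIdxMax
      = ([c0, c1, c2, c3, c4, c5].filter (fun x => x != [0, 0, 0, 0, 0, 0])).map argmaxB := by
    apply List.map_congr_left
    intro x hx
    have hx6 : x ∈ [c0, c1, c2, c3, c4, c5] := List.mem_of_mem_filter hx
    have hne : x ≠ [] := by
      simp only [List.mem_cons, List.not_mem_nil, or_false] at hx6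
      rcases hx6 with rfl | rfl | rfl | rfl | rfl | rfl <;> assumption
    exact (argmax_eq x hne).symm
  rw [hmap]
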